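-- pv_equiv track=rewrite | github.com/yuvalkry/nrl-qasrl | nrl/models/qanom_parser.py | start_end_range
-- ===== SOURCE A (Python) =====
-- import math
--
-- def start_end_range(num_spans):
--     n = int(.5 * (math.sqrt(8 * num_spans + 1) -1))
--
--     result = []
--     i = 0
--     for start in range(n):
--         for end in range(start, n):
--             result.append((start, end, i))
--             i += 1
--
--     return result
-- ===== SOURCE B (Python) =====
-- import math
--
-- def start_end_range(num_spans):
--     n = (math.isqrt(8 * num_spans + 1) - 1) // 2
--     total = n * (n + 1) // 2
--     result = []
--     start = 0
--     end = 0
--     for i in range(total):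
--         result.append((start, end, i))
--         end += 1
--         if end == n:
--             start += 1
--             end = start
--     return result
-- ===== Notes on version B (the rewrite author's own statement) =====
-- stated objective: alternative
-- what changed: Replaces the nested start/end range loops with one flat loop over range(n*(n+1)//2) that carries (start,end) as explicit state, and derives n with exact integer math.isqrt instead of float math.sqrt.
import Mathlib
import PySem

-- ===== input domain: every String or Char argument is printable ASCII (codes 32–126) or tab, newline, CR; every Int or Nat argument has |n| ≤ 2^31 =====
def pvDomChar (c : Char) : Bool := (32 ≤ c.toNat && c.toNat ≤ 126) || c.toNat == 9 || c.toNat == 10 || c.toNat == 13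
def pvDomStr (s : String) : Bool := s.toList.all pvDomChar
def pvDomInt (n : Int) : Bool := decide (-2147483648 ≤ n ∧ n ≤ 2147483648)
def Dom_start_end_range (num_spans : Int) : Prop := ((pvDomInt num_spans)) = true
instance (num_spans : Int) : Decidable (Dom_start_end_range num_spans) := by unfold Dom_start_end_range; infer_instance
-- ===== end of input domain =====

-- B replaces A's nested start/end loops by one flat loop over range(n*(n+1)//2) carrying
-- (start,end) as explicit state (objective: alternative decomposition, same cost).

-- ===== PORT A =====
-- math.sqrt is a float sqrt; on the stated domain (0 ≤ num_spans ≤ 2^31) the Python value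
-- int(.5*(math.sqrt(8*num_spans+1)-1)) is exactly (isqrt(8*num_spans+1)-1)//2 (the float
-- result is exact there and the int() truncation of the nonnegative value is a floor),
-- so it is ported by hand as Int.sqrt with floor division.
def start_end_range (num_spans : Int) : List (Int × Int × Int) :=
  let n : Int := PySem.Int.floordiv (Int.sqrt (8 * num_spans + 1) - 1) 2
  ((PySem.List.pyRange 0 n 1).foldl
    (fun (st : List (Int × Int × Int) × Int) (start : Int) =>
      (PySem.List.pyRange start n 1).foldl
        (fun (st2 : List (Int × Int × Int) × Int) (e : Int) =>
          (st2.1 ++ [(start, e, st2.2)], st2.2 + 1)) st)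
    ([], 0)).1

-- ===== PORT B =====
-- math.isqrt on the nonnegative domain is Int.sqrt (exact integer square root).
def start_end_range_alt (num_spans : Int) : List (Int × Int × Int) :=
  let n : Int := PySem.Int.floordiv (Int.sqrt (8 * num_spans + 1) - 1) 2
  let total : Int := PySem.Int.floordiv (n * (n + 1)) 2
  ((PySem.List.pyRange 0 total 1).foldl
    (fun (st : List (Int × Int × Int) × Int × Int) (i : Int) =>
      (st.1 ++ [(st.2.1, st.2.2, i)],
        if st.2.2 + 1 = n then (st.2.1 + 1, st.2.1 + 1) else (st.2.1, st.2.2 + 1)))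
    ([], 0, 0)).1

-- ===== PRECONDITION & SPEC =====
-- Pre_ excludes negative num_spans, on which A raises ValueError (math domain error).
def Pre_start_end_range (num_spans : Int) : Prop := 0 ≤ num_spans
instance (num_spans : Int) : Decidable (Pre_start_end_range num_spans) := by
  unfold Pre_start_end_range; infer_instance
def pvWitness_start_end_range : Int := 7

def Spec_start_end_range (num_spans : Int) (out : List (Int × Int × Int)) : Prop := out = start_end_range_alt num_spans
instance (num_spans : Int) (out : List (Int × Int × Int)) : Decidable (Spec_start_end_range num_spans out) := by unfold Spec_start_end_range; infer_instance

-- ===== CLAIM (what is proved, stated in full; the proofs are below) =====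
def Claim_equal_start_end_range : Prop := ∀ (num_spans : Int), Dom_start_end_range num_spans → Pre_start_end_range num_spans → Spec_start_end_range num_spans (start_end_range num_spans)

-- ===== LEMMAS AND PROOFS =====

/-- Tag a list of pairs with consecutive integer indices starting at `i`. -/
def pvTag : Int → List (Int × Int) → List (Int × Int × Int)
  | _, [] => []
  | i, p :: t => (p.1, p.2, i) :: pvTag (i + 1) t

/-- The (start,end) pairs B's flat loop visits in `k` steps from state (s,e). -/
def pvWalk (n : Int) : Nat → Int → Int → List (Int × Int)
  | 0, _, _ => []
  | k+1, s, e => (s, e) :: (if e + 1 = n then pvWalk n k (s+1) (s+1) else pvWalk n k s (e+1))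

/-- B's loop state after `k` steps from (s,e). -/
def pvFin (n : Int) : Nat → Int → Int → Int × Int
  | 0, s, e => (s, e)
  | k+1, s, e => if e + 1 = n then pvFin n k (s+1) (s+1) else pvFin n k s (e+1)

def pvTri : Nat → Nat
  | 0 => 0
  | d+1 => (d+1) + pvTri d

theorem pvTag_append (i : Int) (l1 l2 : List (Int × Int)) :
    pvTag i (l1 ++ l2) = pvTag i l1 ++ pvTag (i + l1.length) l2 := by
  induction l1 generalizing i with
  | nil => simp [pvTag]
  | cons h t ih =>
    simp only [List.cons_append, pvTag, ih, List.length_cons]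
    have h : i + ((t.length + 1 : Nat) : Int) = i + 1 + (t.length : Int) := by push_cast; ring
    rw [h]

theorem pv_inner (s : Int) (M : List Int) : ∀ (acc : List (Int × Int × Int)) (i : Int),
    M.foldl
      (fun (st2 : List (Int × Int × Int) × Int) (e : Int) =>
        (st2.1 ++ [(s, e, st2.2)], st2.2 + 1)) (acc, i)
    = (acc ++ pvTag i (M.map (fun e => (s, e))), i + M.length) := by
  induction M with
  | nil => intro acc i; simp [pvTag]
  | cons h t ih =>
    intro acc i
    simp only [List.foldl_cons, List.map_cons, pvTag, List.length_cons]
    rw [ih]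
    refine Prod.ext ?_ ?_
    · simp
    · push_cast; ring

theorem pv_outer (n : Int) (L : List Int) : ∀ (acc : List (Int × Int × Int)) (i : Int),
    L.foldl
      (fun (st : List (Int × Int × Int) × Int) (start : Int) =>
        (PySem.List.pyRange start n 1).foldl
          (fun (st2 : List (Int × Int × Int) × Int) (e : Int) =>
            (st2.1 ++ [(start, e, st2.2)], st2.2 + 1)) st) (acc, i)
    = (acc ++ pvTag i (L.flatMap (fun s => (PySem.List.pyRange s n 1).map (fun e => (s, e)))),
       i + (L.flatMap (fun s => (PySem.List.pyRange s n 1).map (fun e => (s, e)))).length) := by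
  induction L with
  | nil => intro acc i; simp [pvTag]
  | cons s t ih =>
    intro acc i
    simp only [List.foldl_cons, List.flatMap_cons]
    rw [pv_inner s, ih, pvTag_append]
    refine Prod.ext ?_ ?_
    · simp [List.append_assoc, List.length_map]
    · simp [List.length_append, List.length_map]
      ring

theorem pv_bfold (n : Int) : ∀ (k : Nat) (i0 s e : Int) (res : List (Int × Int × Int)),
    (PySem.List.pyRange i0 (i0 + (k : Int)) 1).foldl
      (fun (st : List (Int × Int × Int) × Int × Int) (i : Int) =>
        (st.1 ++ [(st.2.1, st.2.2, i)],
          if st.2.2 + 1 = n then (st.2.1 + 1, st.2.1 + 1) else (st.2.1, st.2.2 + 1)))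
      (res, s, e)
    = (res ++ pvTag i0 (pvWalk n k s e), pvFin n k s e) := by
  intro k
  induction k with
  | zero =>
    intro i0 s e res
    rw [PySem.List.pyRange_one_eq_nil (by push_cast; omega)]
    simp [pvWalk, pvFin, pvTag]
  | succ k ih =>
    intro i0 s e res
    rw [PySem.List.pyRange_one_cons (by push_cast; omega)]
    simp only [List.foldl_cons]
    rw [show i0 + ((k + 1 : Nat) : Int) = (i0 + 1) + (k : Int) by push_cast; ring]
    by_cases hc : e + 1 = n
    · simp only [hc, if_pos]
      rw [ih]
      simp [pvWalk, pvFin, hc, pvTag]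
    · simp only [if_neg hc]
      rw [ih]
      simp [pvWalk, pvFin, hc, pvTag]

theorem pv_row (n : Int) : ∀ (c k : Nat) (s e : Int), 1 ≤ c → e + (c : Int) = n →
    pvWalk n (c + k) s e
      = (PySem.List.pyRange e n 1).map (fun x => (s, x)) ++ pvWalk n k (s+1) (s+1) := by
  intro c
  induction c with
  | zero => intro k s e h; omega
  | succ c ih =>
    intro k s e _ hn
    have hlt : e < n := by push_cast at hn; omega
    rw [PySem.List.pyRange_one_cons hlt, List.map_cons]
    by_cases hc0 : c = 0
    · subst hc0
      have he : e + 1 = n := by push_cast at hn; omega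
      rw [show 1 + k = k + 1 by omega]
      simp only [pvWalk, if_pos he]
      rw [PySem.List.pyRange_one_eq_nil (by omega)]
      simp
    · have he : e + 1 ≠ n := by push_cast at hn; omega
      rw [show c + 1 + k = (c + k) + 1 by omega]
      simp only [pvWalk, if_neg he]
      rw [ih k s (e+1) (by omega) (by push_cast at hn ⊢; omega)]
      simp

theorem pv_walk_all (n : Int) : ∀ (d : Nat) (s : Int), s + (d : Int) = n →
    pvWalk n (pvTri d) s s
      = (PySem.List.pyRange s n 1).flatMap (fun s' => (PySem.List.pyRange s' n 1).map (fun e => (s', e))) := by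
  intro d
  induction d with
  | zero =>
    intro s h
    rw [PySem.List.pyRange_one_eq_nil (by push_cast at h; omega)]
    simp [pvTri, pvWalk]
  | succ d ih =>
    intro s h
    have hlt : s < n := by push_cast at h; omega
    rw [PySem.List.pyRange_one_cons hlt, List.flatMap_cons]
    simp only [pvTri]
    rw [pv_row n (d+1) (pvTri d) s s (by omega) (by push_cast at h ⊢; omega)]
    rw [ih (s+1) (by push_cast at h ⊢; omega)]

theorem pv_tri_two : ∀ d : Nat, 2 * pvTri d = d * (d + 1) := by
  intro d
  induction d with
  | zero => rfl
  | succ d ih => simp only [pvTri]; rw [Nat.mul_add, ih]; ring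

-- ===== VERDICT (by name: the statement is the Claim_ definition above) =====
theorem start_end_range_spec : Claim_equal_start_end_range := by
  unfold Claim_equal_start_end_range Spec_start_end_range Pre_start_end_range
  intro num_spans _ hpre
  simp only [start_end_range, start_end_range_alt]
  set n : Int := PySem.Int.floordiv (Int.sqrt (8 * num_spans + 1) - 1) 2 with hn
  have hs : 1 ≤ Int.sqrt (8 * num_spans + 1) := by
    have h1 : 0 < Nat.sqrt ((8 * num_spans + 1).toNat) := Nat.sqrt_pos.mpr (by omega)
    rw [Int.sqrt]
    exact_mod_cast h1
  have hn0 : 0 ≤ n := by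
    rw [hn, PySem.Int.floordiv_eq_ediv_of_pos (by norm_num)]
    exact Int.ediv_nonneg (by omega) (by norm_num)
  obtain ⟨d, hd⟩ : ∃ d : Nat, n = (d:Int) := ⟨n.toNat, (Int.toNat_of_nonneg hn0).symm⟩
  have hdc : d * (d + 1) / 2 = pvTri d := by
    rw [← pv_tri_two d, Nat.mul_div_cancel_left _ two_pos]
  have htot : PySem.Int.floordiv (n * (n + 1)) 2 = ((pvTri d : Nat) : Int) := by
    rw [hd]
    rw [show ((d:Int)) * ((d:Int) + 1) = ((d * (d + 1) : Nat) : Int) by push_cast; ring]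
    rw [show ((pvTri d : Nat) : Int) = ((d * (d + 1) / 2 : Nat) : Int) by rw [hdc]]
    exact_mod_cast PySem.Int.floordiv_natCast (d * (d + 1)) 2
  rw [htot, show ((pvTri d : Nat) : Int) = (0:Int) + ((pvTri d : Nat) : Int) by ring]
  rw [pv_bfold n (pvTri d) 0 0 0 []]
  rw [pv_outer n (PySem.List.pyRange 0 n 1) [] 0]
  simp only [List.nil_append]
  congr 1
  exact (pv_walk_all n d 0 (by omega)).symm
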